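-- pv_equiv track=rewrite | github.com/ShephardLuke/advent-of-code-2024 | day05/updateValidator.py | getValidUpdates
-- ===== SOURCE A (Python) =====
-- def getValidUpdates(updates, rules):
--     valid = []
--     invalid = []
--
--     for update in updates:
--         if isValidUpdate(update, rules):
--             valid.append(update)
--         else:
--             invalid.append(update)
--
--     return (valid, invalid)
--
-- def isValidUpdate(update, rules):
--     done = {}
--     contains = {}
--
--     for page in update:
--         contains[page] = True
--
--     for page in update:
--         if page in rules:
--             for dependency in rules[page]:
--                 if dependency in contains and dependency not in done:
--                     return False
--         done[page] = True
--
--     return True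
-- ===== SOURCE B (Python) =====
-- def getValidUpdates(updates, rules):
--     valid = []
--     invalid = []
--     for update in updates:
--         (valid if _ok(update, rules) else invalid).append(update)
--     return (valid, invalid)
--
-- def _ok(update, rules):
--     # Walk the distinct pages in REVERSE first-occurrence order, growing the set of
--     # pages at-or-after the current one; a dependency found in that set means it does
--     # not occur strictly earlier, so the update is invalid.
--     later = set()
--     for page in reversed(list(dict.fromkeys(update))):
--         later.add(page)
--         if not later.isdisjoint(rules.get(page, [])):
--             return False
--     return True
-- ===== Notes on version B (the rewrite author's own statement) =====
-- stated objective: alternative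
-- what changed: B judges each update by scanning its distinct pages in reverse first-occurrence order while growing a set of at-or-after pages and testing each page's dependencies for disjointness with it, instead of A's forward scan over all pages with incremental done/contains dict marking.
import Mathlib
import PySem

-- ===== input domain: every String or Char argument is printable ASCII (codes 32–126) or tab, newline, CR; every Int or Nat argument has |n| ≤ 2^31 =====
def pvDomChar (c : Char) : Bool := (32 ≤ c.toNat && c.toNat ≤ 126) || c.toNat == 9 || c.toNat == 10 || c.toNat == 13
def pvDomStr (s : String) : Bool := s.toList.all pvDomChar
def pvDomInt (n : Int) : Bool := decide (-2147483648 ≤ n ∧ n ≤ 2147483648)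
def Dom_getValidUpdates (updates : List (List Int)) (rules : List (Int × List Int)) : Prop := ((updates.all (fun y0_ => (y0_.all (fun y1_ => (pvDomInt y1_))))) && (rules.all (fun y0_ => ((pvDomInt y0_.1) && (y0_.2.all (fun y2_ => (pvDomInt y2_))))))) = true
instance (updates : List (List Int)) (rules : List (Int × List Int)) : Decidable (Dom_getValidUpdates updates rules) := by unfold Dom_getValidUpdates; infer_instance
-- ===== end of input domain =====

-- B validates each update by a reverse scan over the distinct pages (first-occurrence order),
-- growing a set of at-or-after pages and testing dependency disjointness, instead of A's forward
-- scan with incremental done/contains dict marking: an alternative algorithm, same results.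


-- ===== PORT A =====
-- `contains[page] = True` loop (also reused for A's growing `done` dict)
def pvMarkAll (seen : List Int) : PySem.Dict Int Bool :=
  seen.foldl (fun d p => d.insert p true) PySem.Dict.empty

-- `for dependency in rules[page]: if dependency in contains and dependency not in done: return False`
def pvDepsLoopA (cont done : PySem.Dict Int Bool) : List Int → Bool
  | [] => true
  | dep :: rest =>
      if cont.contains dep && !(done.contains dep) then false
      else pvDepsLoopA cont done rest

-- `for page in update: … ; done[page] = True`
def pvPagesLoopA (rules : PySem.Dict Int (List Int)) (cont : PySem.Dict Int Bool) :
    PySem.Dict Int Bool → List Int → Bool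
  | _, [] => true
  | done, p :: rest =>
      if (if rules.contains p then pvDepsLoopA cont done (rules.getD p []) else true) then
        pvPagesLoopA rules cont (done.insert p true) rest
      else false

def isValidUpdate (update : List Int) (rules : List (Int × List Int)) : Bool :=
  pvPagesLoopA (PySem.Dict.mk rules) (pvMarkAll update) PySem.Dict.empty update

def getValidUpdates (updates : List (List Int)) (rules : List (Int × List Int)) :
    List (List Int) × List (List Int) :=
  updates.foldl
    (fun acc u =>
      if isValidUpdate u rules then (acc.1 ++ [u], acc.2) else (acc.1, acc.2 ++ [u]))
    ([], [])

-- ===== PORT B =====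
-- `for page in reversed(list(dict.fromkeys(update))): later.add(page); if not later.isdisjoint(rules.get(page, [])): return False`
def pvOkLoopB (rulesD : PySem.Dict Int (List Int)) : PySem.Set Int → List Int → Bool
  | _, [] => true
  | later, p :: rest =>
      let later' := PySem.Set.add later p
      if !(PySem.Set.isdisjoint later' (rulesD.getD p [])) then false
      else pvOkLoopB rulesD later' rest

def pvOkB (update : List Int) (rules : List (Int × List Int)) : Bool :=
  pvOkLoopB (PySem.Dict.mk rules) PySem.Set.empty (PySem.List.dedup update).reverse

def getValidUpdates_alt (updates : List (List Int)) (rules : List (Int × List Int)) :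
    List (List Int) × List (List Int) :=
  updates.foldl
    (fun acc u =>
      if pvOkB u rules then (acc.1 ++ [u], acc.2) else (acc.1, acc.2 ++ [u]))
    ([], [])

-- ===== PRECONDITION & SPEC =====
def Spec_getValidUpdates (updates : List (List Int)) (rules : List (Int × List Int)) (out : List (List Int) × List (List Int)) : Prop := out = getValidUpdates_alt updates rules
instance (updates : List (List Int)) (rules : List (Int × List Int)) (out : List (List Int) × List (List Int)) : Decidable (Spec_getValidUpdates updates rules out) := by unfold Spec_getValidUpdates; infer_instance

-- ===== CLAIM (what is proved, stated in full; the proofs are below) =====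
def Claim_equal_getValidUpdates : Prop := ∀ (updates : List (List Int)) (rules : List (Int × List Int)), Dom_getValidUpdates updates rules → Spec_getValidUpdates updates rules (getValidUpdates updates rules)

-- ===== LEMMAS AND PROOFS =====

-- the dependencies A/B look up for a page
def pvDeps (rules : List (Int × List Int)) (p : Int) : List Int :=
  (PySem.Dict.mk rules).getD p []

-- first-occurrence index
def pvFidx (u : List Int) (p : Int) : Nat :=
  (PySem.List.index? u p).getD 0

-- the common mathematical characterisation of a valid update
def pvGood (u : List Int) (rules : List (Int × List Int)) : Prop :=
  ∀ p ∈ u, ∀ d ∈ pvDeps rules p, d ∈ u → pvFidx u d < pvFidx u p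

lemma pvIndex?_of_mem {u : List Int} {p : Int} (h : p ∈ u) :
    PySem.List.index? u p = some (pvFidx u p) := by
  obtain ⟨k, hk⟩ := Option.isSome_iff_exists.mp ((PySem.List.index?_isSome_iff u p).mpr h)
  simp only [pvFidx, hk, Option.getD_some]

lemma pvFidx_lt_of_mem_pre {pre suf : List Int} {d : Int} (h : d ∈ pre) :
    pvFidx (pre ++ suf) d < pre.length := by
  obtain ⟨k, hk⟩ := Option.isSome_iff_exists.mp ((PySem.List.index?_isSome_iff pre d).mpr h)
  obtain ⟨hlt, -, -⟩ := PySem.List.getElem_of_index?_eq_some hk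
  have h2 : pvFidx (pre ++ suf) d = k := by
    simp only [pvFidx, PySem.List.index?_append_of_mem suf h, hk, Option.getD_some]
  omega

lemma pvMem_pre_of_fidx_lt {pre suf : List Int} {d : Int} (hd : d ∈ pre ++ suf)
    (h : pvFidx (pre ++ suf) d < pre.length) : d ∈ pre := by
  have hk := pvIndex?_of_mem hd
  obtain ⟨hlt, hget, -⟩ := PySem.List.getElem_of_index?_eq_some hk
  have hgl : (pre ++ suf)[pvFidx (pre ++ suf) d]'hlt = pre[pvFidx (pre ++ suf) d]'h :=
    List.getElem_append_left h
  rw [hgl] at hget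
  exact hget ▸ List.getElem_mem h

-- pvGood as a statement about decompositions u = pre ++ p :: suf
lemma pvGood_iff_decomp (u : List Int) (rules : List (Int × List Int)) :
    pvGood u rules ↔
      ∀ pre p suf, u = pre ++ p :: suf → ∀ d ∈ pvDeps rules p, d ∈ u → d ∈ pre := by
  constructor
  · intro hG pre p suf hu d hd hdu
    have hp : p ∈ u := by rw [hu]; simp
    have hlt := hG p hp d hd hdu
    by_cases hppre : p ∈ pre
    · have h1 : pvFidx u p < pre.length := by
        rw [hu]; exact pvFidx_lt_of_mem_pre (suf := p :: suf) hppre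
      exact pvMem_pre_of_fidx_lt (hu ▸ hdu) (by rw [← hu]; omega)
    · have h1 : PySem.List.index? u p = some pre.length :=
        (PySem.List.index?_eq_some_iff u p pre.length).mpr ⟨pre, suf, hu, rfl, hppre⟩
      have h2 : pvFidx u p = pre.length := by
        simp only [pvFidx, h1, Option.getD_some]
      exact pvMem_pre_of_fidx_lt (hu ▸ hdu) (by rw [← hu]; omega)
  · intro hR p hp d hd hdu
    obtain ⟨pre, suf, hu, hlen, hnp⟩ :=
      (PySem.List.index?_eq_some_iff u p (pvFidx u p)).mp (pvIndex?_of_mem hp)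
    have hdpre : d ∈ pre := hR pre p suf hu d hd hdu
    have h1 : pvFidx u d < pre.length := by
      rw [hu]; exact pvFidx_lt_of_mem_pre (suf := p :: suf) hdpre
    omega

-- ---- A side ----

lemma pvMarkAll_contains (seen : List Int) (d : Int) :
    (pvMarkAll seen).contains d = true ↔ d ∈ seen := by
  rw [PySem.Dict.contains_iff_mem_keys, pvMarkAll,
    PySem.Dict.keys_foldl_insert seen (fun _ _ => true) PySem.Dict.empty]
  simp [PySem.Dict.keys_empty, PySem.Set.update,
    ← PySem.Set.ofList_eq_foldl, PySem.Set.mem_ofList]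

lemma pvMarkAll_snoc (seen : List Int) (p : Int) :
    (pvMarkAll seen).insert p true = pvMarkAll (seen ++ [p]) := by
  simp [pvMarkAll, List.foldl_append]

lemma pvDepsLoopA_iff (u seen deps : List Int) :
    pvDepsLoopA (pvMarkAll u) (pvMarkAll seen) deps = true ↔
      ∀ d ∈ deps, d ∈ u → d ∈ seen := by
  induction deps with
  | nil => simp [pvDepsLoopA]
  | cons dep rest ih =>
    simp only [pvDepsLoopA]
    by_cases hdu : dep ∈ u
    · by_cases hds : dep ∈ seen
      · have c1 := (pvMarkAll_contains u dep).mpr hdu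
        have c2 := (pvMarkAll_contains seen dep).mpr hds
        simp [c1, c2, ih, hds]
      · have c1 := (pvMarkAll_contains u dep).mpr hdu
        have c2 : (pvMarkAll seen).contains dep = false :=
          Bool.eq_false_iff.mpr (fun hh => hds ((pvMarkAll_contains seen dep).mp hh))
        simp only [c1, c2, Bool.not_false, Bool.and_true, if_true]
        constructor
        · intro h; exact absurd h (by simp)
        · intro H; exact absurd hds (by simpa using (H dep (by simp) hdu))
    · have c1 : (pvMarkAll u).contains dep = false :=
        Bool.eq_false_iff.mpr (fun hh => hdu ((pvMarkAll_contains u dep).mp hh))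
      simp [c1, ih, hdu]

-- inner guard of A's page loop
lemma pvInnerA_iff (rules : List (Int × List Int)) (u seen : List Int) (p : Int) :
    (if (PySem.Dict.mk rules).contains p then
        pvDepsLoopA (pvMarkAll u) (pvMarkAll seen) ((PySem.Dict.mk rules).getD p [])
      else true) = true ↔
      ∀ d ∈ pvDeps rules p, d ∈ u → d ∈ seen := by
  by_cases hc : (PySem.Dict.mk rules).contains p = true
  · rw [if_pos hc]; exact pvDepsLoopA_iff u seen _
  · rw [if_neg hc]
    have h0 : pvDeps rules p = [] :=
      PySem.Dict.getD_of_not_contains _ _ (Bool.eq_false_iff.mpr hc)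
    simp [h0]

-- recursive restatement of A's loop result
def pvChain (u : List Int) (rules : List (Int × List Int)) : List Int → List Int → Prop
  | _, [] => True
  | seen, p :: rest =>
      (∀ d ∈ pvDeps rules p, d ∈ u → d ∈ seen) ∧ pvChain u rules (seen ++ [p]) rest

lemma pvPagesLoopA_iff (rules : List (Int × List Int)) (u : List Int) :
    ∀ rest seen, pvPagesLoopA (PySem.Dict.mk rules) (pvMarkAll u) (pvMarkAll seen) rest = true ↔
      pvChain u rules seen rest := by
  intro rest
  induction rest with
  | nil => intro seen; simp [pvPagesLoopA, pvChain]
  | cons p r ih =>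
    intro seen
    simp only [pvPagesLoopA]
    by_cases hI : ∀ d ∈ pvDeps rules p, d ∈ u → d ∈ seen
    · rw [(pvInnerA_iff rules u seen p).mpr hI]
      rw [if_pos rfl, pvMarkAll_snoc, ih (seen ++ [p])]
      simp only [pvChain]
      exact ⟨fun h => ⟨hI, h⟩, fun h => h.2⟩
    · have hb : (if (PySem.Dict.mk rules).contains p then
          pvDepsLoopA (pvMarkAll u) (pvMarkAll seen) ((PySem.Dict.mk rules).getD p [])
        else true) = false :=
        Bool.eq_false_iff.mpr (fun hh => hI ((pvInnerA_iff rules u seen p).mp hh))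
      rw [hb]
      simp [pvChain, hI]

lemma pvChain_iff_decomp (u : List Int) (rules : List (Int × List Int)) :
    ∀ rest seen, pvChain u rules seen rest ↔
      ∀ pre p suf, rest = pre ++ p :: suf → ∀ d ∈ pvDeps rules p, d ∈ u → d ∈ seen ++ pre := by
  intro rest
  induction rest with
  | nil =>
    intro seen
    simp only [pvChain]
    constructor
    · intro _ pre p suf h; exact absurd h (by simp)
    · intro _; trivial
  | cons q r ih =>
    intro seen
    simp only [pvChain]
    rw [ih (seen ++ [q])]
    constructor
    · rintro ⟨h0, hrec⟩ pre p suf hqr d hd hdu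
      cases pre with
      | nil =>
        simp only [List.nil_append, List.cons.injEq] at hqr
        obtain ⟨rfl, rfl⟩ := hqr
        simpa using h0 d hd hdu
      | cons q' pre' =>
        simp only [List.cons_append, List.cons.injEq] at hqr
        obtain ⟨rfl, hr⟩ := hqr
        have := hrec pre' p suf hr d hd hdu
        simpa [List.append_assoc] using this
    · intro H
      refine ⟨fun d hd hdu => by simpa using H [] q r rfl d hd hdu, ?_⟩
      intro pre p suf hr d hd hdu
      have := H (q :: pre) p suf (by simp [hr]) d hd hdu
      simpa [List.append_assoc] using this

lemma pvIsValid_iff_good (u : List Int) (rules : List (Int × List Int)) :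
    isValidUpdate u rules = true ↔ pvGood u rules := by
  have h0 : (PySem.Dict.empty : PySem.Dict Int Bool) = pvMarkAll [] := rfl
  rw [isValidUpdate, h0, pvPagesLoopA_iff, pvChain_iff_decomp, pvGood_iff_decomp]
  simp

-- ---- B side ----

-- fidx is unchanged by appending an element already present
lemma pvFidx_append_of_mem (u : List Int) (x a : Int) (h : a ∈ u) :
    pvFidx (u ++ [x]) a = pvFidx u a := by
  simp only [pvFidx, PySem.List.index?_append_of_mem [x] h]

lemma pvFidx_lt_length {u : List Int} {a : Int} (h : a ∈ u) : pvFidx u a < u.length := by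
  obtain ⟨hlt, -, -⟩ := PySem.List.getElem_of_index?_eq_some (pvIndex?_of_mem h)
  exact hlt

lemma pvFidx_append_self (u : List Int) (x : Int) (h : x ∉ u) :
    pvFidx (u ++ [x]) x = u.length := by
  simp only [pvFidx, PySem.List.index?_append_singleton_self u x h, Option.getD_some]

-- the distinct pages, in first-occurrence order, have strictly increasing first indices
lemma pvPairwise_fidx (u : List Int) :
    (PySem.List.dedup u).Pairwise (fun a b => pvFidx u a < pvFidx u b) := by
  induction u using List.reverseRecOn with
  | nil => simp [PySem.List.dedup]
  | append_singleton u' x ih =>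
    have hd : PySem.List.dedup (u' ++ [x]) = PySem.Set.add (PySem.List.dedup u') x := by
      simp [PySem.Set.ofList_append_singleton]
    have hsub : ∀ a ∈ PySem.List.dedup u', a ∈ u' := fun a ha =>
      (PySem.List.mem_dedup u' a).mp ha
    have ih' : (PySem.List.dedup u').Pairwise
        (fun a b => pvFidx (u' ++ [x]) a < pvFidx (u' ++ [x]) b) := by
      refine List.Pairwise.imp_of_mem ?_ ih
      intro a b ha hb hab
      rw [pvFidx_append_of_mem u' x a (hsub a ha), pvFidx_append_of_mem u' x b (hsub b hb)]
      exact hab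
    rw [hd]
    by_cases hx : x ∈ u'
    · rw [PySem.Set.add_of_mem (by simpa [PySem.List.mem_dedup] using hx)]
      exact ih'
    · rw [PySem.Set.add_of_not_mem (by simpa [PySem.List.mem_dedup] using hx)]
      refine List.pairwise_append.mpr ⟨ih', List.pairwise_singleton _ _, ?_⟩
      intro a ha b hb
      simp only [List.mem_singleton] at hb
      rw [hb, pvFidx_append_of_mem u' x a (hsub a ha), pvFidx_append_self u' x hx]
      exact pvFidx_lt_length (hsub a ha)

-- append-singleton lists decompose around a middle element in exactly two ways
lemma pvSnocDecomp {l' : List Int} {q p : Int} {A B : List Int}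
    (h : l' ++ [q] = A ++ p :: B) :
    (A = l' ∧ p = q ∧ B = []) ∨ ∃ B', B = B' ++ [q] ∧ l' = A ++ p :: B' := by
  cases B using List.reverseRecOn with
  | nil =>
    obtain ⟨h1, h2⟩ := List.append_inj' h (by simp)
    simp only [List.cons.injEq] at h2
    exact Or.inl ⟨h1.symm, h2.1.symm, rfl⟩
  | append_singleton B' q' =>
    have h2 : l' ++ [q] = (A ++ p :: B') ++ [q'] := by simpa using h
    obtain ⟨h3, h4⟩ := List.append_inj' h2 (by simp)
    simp only [List.cons.injEq] at h4
    exact Or.inr ⟨B', by rw [h4.1], h3⟩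

-- B's reverse loop, characterised over decompositions of the (un-reversed) list
lemma pvOkLoopB_iff (rulesD : PySem.Dict Int (List Int)) :
    ∀ (l : List Int) (S : PySem.Set Int),
      pvOkLoopB rulesD S l.reverse = true ↔
        ∀ A p B, l = A ++ p :: B → ∀ d ∈ rulesD.getD p [], ¬(d ∈ S ∨ d ∈ p :: B) := by
  intro l
  induction l using List.reverseRecOn with
  | nil =>
    intro S
    simp only [List.reverse_nil, pvOkLoopB]
    constructor
    · intro _ A p B h; exact absurd h (by simp)
    · intro _; trivial
  | append_singleton l' q ih =>
    intro S
    rw [List.reverse_append, List.reverse_singleton, List.singleton_append]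
    simp only [pvOkLoopB]
    by_cases hq : ∀ d ∈ rulesD.getD q [], ¬(d ∈ S ∨ d = q)
    · have hdisj : PySem.Set.isdisjoint (PySem.Set.add S q) (rulesD.getD q []) = true := by
        rw [PySem.Set.isdisjoint_iff]
        intro x hx hxd
        exact hq x hxd ((PySem.Set.mem_add _ _ _).mp hx)
      rw [hdisj]
      simp only [Bool.not_true, Bool.false_eq_true, if_false, ih (PySem.Set.add S q)]
      constructor
      · intro H A p B hdec d hd hbad
        rcases pvSnocDecomp hdec with ⟨-, rfl, rfl⟩ | ⟨B', rfl, hl'⟩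
        · exact hq d hd (by simpa using hbad)
        · refine H A p B' hl' d hd ?_
          rcases hbad with hS | hpB
          · exact Or.inl ((PySem.Set.mem_add _ _ _).mpr (Or.inl hS))
          · rcases List.mem_cons.mp hpB with rfl | hB
            · exact Or.inr (List.mem_cons_self)
            · rcases List.mem_append.mp hB with hB' | hqq
              · exact Or.inr (List.mem_cons.mpr (Or.inr hB'))
              · exact Or.inl ((PySem.Set.mem_add _ _ _).mpr (Or.inr (by simpa using hqq)))
      · intro H A p B' hl' d hd hbad
        refine H A p (B' ++ [q]) (by rw [hl']; simp) d hd ?_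
        rcases hbad with hS | hpB
        · rcases (PySem.Set.mem_add _ _ _).mp hS with hS' | rfl
          · exact Or.inl hS'
          · exact Or.inr (List.mem_cons.mpr (Or.inr (by simp)))
        · rcases List.mem_cons.mp hpB with rfl | hB
          · exact Or.inr List.mem_cons_self
          · exact Or.inr (List.mem_cons.mpr (Or.inr (by simp [hB])))
    · have hnd : PySem.Set.isdisjoint (PySem.Set.add S q) (rulesD.getD q []) = false := by
        push Not at hq
        obtain ⟨d, hd, hbad⟩ := hq
        refine Bool.eq_false_iff.mpr (fun hh => ?_)
        exact ((PySem.Set.isdisjoint_iff _ _).mp hh) d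
          ((PySem.Set.mem_add _ _ _).mpr hbad) hd
      rw [hnd]
      simp only [Bool.not_false, if_true]
      constructor
      · intro h; exact absurd h (by simp)
      · intro H
        push Not at hq
        obtain ⟨d, hd, hbad⟩ := hq
        exact absurd (H l' q [] rfl d hd) (by
          simp only [not_not]
          rcases hbad with hS | rfl
          · exact Or.inl hS
          · exact Or.inr (by simp))

lemma pvOkB_iff_good (u : List Int) (rules : List (Int × List Int)) :
    pvOkB u rules = true ↔ pvGood u rules := by
  rw [pvOkB, pvOkLoopB_iff]
  constructor
  · intro H p hp d hd hdu
    obtain ⟨A, B, hAB⟩ := List.append_of_mem ((PySem.List.mem_dedup u p).mpr hp)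
    have hc := H A p B hAB d hd
    push Not at hc
    have hdd : d ∈ A ++ p :: B := hAB ▸ ((PySem.List.mem_dedup u d).mpr hdu)
    have hdA : d ∈ A := by
      rcases List.mem_append.mp hdd with h | h
      · exact h
      · exact absurd h hc.2
    have hpw := pvPairwise_fidx u
    rw [hAB] at hpw
    exact (List.pairwise_append.mp hpw).2.2 d hdA p List.mem_cons_self
  · intro G A p B hAB d hd hbad
    have hp : p ∈ u := (PySem.List.mem_dedup u p).mp (hAB ▸ (by simp))
    rcases hbad with hS | hpB
    · exact absurd hS (by simp [PySem.Set.empty])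
    · have hdu : d ∈ u := (PySem.List.mem_dedup u d).mp
        (hAB ▸ (List.mem_append.mpr (Or.inr hpB)))
      have hlt := G p hp d hd hdu
      rcases List.mem_cons.mp hpB with rfl | hB
      · omega
      · have hpw := pvPairwise_fidx u
        rw [hAB] at hpw
        have h2 := (List.pairwise_cons.mp (List.pairwise_append.mp hpw).2.1).1 d hB
        omega

-- ---- putting it together ----

lemma pvIsValid_eq_pvOkB (u : List Int) (rules : List (Int × List Int)) :
    isValidUpdate u rules = pvOkB u rules := by
  rw [Bool.eq_iff_iff, pvIsValid_iff_good, pvOkB_iff_good]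

-- ===== VERDICT (by name: the statement is the Claim_ definition above) =====
theorem getValidUpdates_spec : Claim_equal_getValidUpdates := by
  intro updates rules _
  show getValidUpdates updates rules = getValidUpdates_alt updates rules
  rw [getValidUpdates, getValidUpdates_alt]
  simp only [pvIsValid_eq_pvOkB]
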